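-- pv_equiv track=rewrite | github.com/tekgy/winrapids | research/paper05_permutation_test.py | count_sharing_two
-- ===== SOURCE A (Python) =====
-- def count_sharing_two(algos):
--     """Count pairs sharing ≥2 of 3 coordinates — all rhyme types."""
--     n = len(algos)
--     total = 0
--     for i in range(n):
--         for j in range(i + 1, n):
--             ti, ki, oi = algos[i][1], algos[i][2], algos[i][3]
--             tj, kj, oj = algos[j][1], algos[j][2], algos[j][3]
--             shared = int(ti == tj) + int(ki == kj) + int(oi == oj)
--             if shared >= 2:
--                 total += 1
--     return total
-- ===== SOURCE B (Python) =====
-- def count_sharing_two(algos):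
--     """Count pairs sharing >=2 of 3 coordinates — all rhyme types.
--
--     One pass per key projection: group by (t,k), (t,o), (k,o) and (t,k,o),
--     sum C(c,2) over group sizes, inclusion-exclusion to avoid double counting.
--     """
--     def pair_count(keys):
--         counts = {}
--         for key in keys:
--             counts[key] = counts.get(key, 0) + 1
--         return sum(c * (c - 1) // 2 for c in counts.values())
--
--     tk = pair_count([(row[1], row[2]) for row in algos])
--     to = pair_count([(row[1], row[3]) for row in algos])
--     ko = pair_count([(row[2], row[3]) for row in algos])
--     tko = pair_count([(row[1], row[2], row[3]) for row in algos])
--     return tk + to + ko - 2 * tko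
-- ===== Notes on version B (the rewrite author's own statement) =====
-- stated objective: faster
-- what changed: Replaced the O(n^2) all-pairs scan by one hash-grouping pass per coordinate projection ((t,k),(t,o),(k,o),(t,k,o)) and an inclusion-exclusion sum of C(count,2) over group sizes.
-- outside the precondition, e.g. on count_sharing_two([[]]): A returns 0, B raises IndexError; on count_sharing_two([[1, 2]]): A returns 0, B raises IndexError
import Mathlib
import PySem

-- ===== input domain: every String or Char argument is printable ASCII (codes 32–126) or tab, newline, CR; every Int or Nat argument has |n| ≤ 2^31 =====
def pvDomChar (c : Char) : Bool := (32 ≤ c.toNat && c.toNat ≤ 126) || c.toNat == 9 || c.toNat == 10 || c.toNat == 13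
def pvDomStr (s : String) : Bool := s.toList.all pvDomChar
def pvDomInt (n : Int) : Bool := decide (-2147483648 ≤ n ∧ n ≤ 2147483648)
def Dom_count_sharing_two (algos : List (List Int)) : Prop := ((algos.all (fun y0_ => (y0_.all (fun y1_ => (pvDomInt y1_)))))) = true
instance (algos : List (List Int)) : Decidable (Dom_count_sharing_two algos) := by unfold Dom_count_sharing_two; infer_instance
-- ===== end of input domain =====

-- B replaces A's O(n^2) all-pairs scan by hash-grouping each coordinate projection once and
-- summing C(count,2) with inclusion-exclusion (objective: faster, asymptotic).


-- ===== PORT A =====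
def count_sharing_two (algos : List (List Int)) : Int :=
  let n : Int := algos.length
  (PySem.List.pyRange 0 n 1).foldl (fun total i =>
    (PySem.List.pyRange (i + 1) n 1).foldl (fun total j =>
      let rowi := PySem.List.pyGetD algos i []
      let rowj := PySem.List.pyGetD algos j []
      let ti := PySem.List.pyGetD rowi 1 0
      let ki := PySem.List.pyGetD rowi 2 0
      let oi := PySem.List.pyGetD rowi 3 0
      let tj := PySem.List.pyGetD rowj 1 0
      let kj := PySem.List.pyGetD rowj 2 0
      let oj := PySem.List.pyGetD rowj 3 0
      let shared : Int :=
        (if ti = tj then 1 else 0) + (if ki = kj then 1 else 0) + (if oi = oj then 1 else 0)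
      if 2 ≤ shared then total + 1 else total) total) 0

-- ===== PORT B =====
def pvPairCount {κ : Type} [BEq κ] (keys : List κ) : Int :=
  ((keys.foldl (fun d k => d.insert k (d.getD k 0 + 1)) PySem.Dict.empty).values.map
    (fun c => PySem.Int.floordiv (c * (c - 1)) 2)).sum

def count_sharing_two_alt (algos : List (List Int)) : Int :=
  let tk := pvPairCount (algos.map (fun row => (PySem.List.pyGetD row 1 0, PySem.List.pyGetD row 2 0)))
  let t_o := pvPairCount (algos.map (fun row => (PySem.List.pyGetD row 1 0, PySem.List.pyGetD row 3 0)))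
  let ko := pvPairCount (algos.map (fun row => (PySem.List.pyGetD row 2 0, PySem.List.pyGetD row 3 0)))
  let tko := pvPairCount (algos.map (fun row =>
    (PySem.List.pyGetD row 1 0, PySem.List.pyGetD row 2 0, PySem.List.pyGetD row 3 0)))
  tk + t_o + ko - 2 * tko

-- ===== PRECONDITION & SPEC =====
-- Pre_ excludes inputs containing a row with fewer than 4 entries: with two or more rows both
-- Pythons raise IndexError there, and with zero or one row A returns 0 only because its pair loop
-- never reads any row, while B (which reads every row once) raises IndexError.
def Pre_count_sharing_two (algos : List (List Int)) : Prop :=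
  ∀ row ∈ algos, 4 ≤ row.length
instance (algos : List (List Int)) : Decidable (Pre_count_sharing_two algos) := by
  unfold Pre_count_sharing_two; infer_instance
def pvWitness_count_sharing_two : List (List Int) := [[0, 1, 2, 3], [9, 1, 2, 7]]

def Spec_count_sharing_two (algos : List (List Int)) (out : Int) : Prop := out = count_sharing_two_alt algos
instance (algos : List (List Int)) (out : Int) : Decidable (Spec_count_sharing_two algos out) := by unfold Spec_count_sharing_two; infer_instance

-- ===== CLAIM (what is proved, stated in full; the proofs are below) =====
def Claim_equal_count_sharing_two : Prop := ∀ (algos : List (List Int)), Dom_count_sharing_two algos → Pre_count_sharing_two algos → Spec_count_sharing_two algos (count_sharing_two algos)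

-- ===== LEMMAS AND PROOFS =====

/-- Number of unordered pairs (i < j) with p xsᵢ xsⱼ, as A's nested loop accumulates it. -/
def pvPairsP {α : Type} (p : α → α → Bool) : List α → Int
  | [] => 0
  | x :: r => pvPairsP p r + (r.countP (p x) : Int)

theorem pv_foldl_count {α : Type} (q : α → Bool) :
    ∀ (l : List α) (t : Int), l.foldl (fun t y => if q y then t + 1 else t) t = t + (l.countP q : Int) := by
  intro l
  induction l with
  | nil => simp
  | cons x r ih =>
      intro t
      by_cases h : q x = true <;> simp [List.foldl, h, ih] <;> ring

theorem pv_nested_eq_aux {α : Type} (p : α → α → Bool) (d : α) (xs : List α) :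
    ∀ (k a : Nat), a ≤ xs.length → k = xs.length - a → ∀ (t : Int),
      (PySem.List.pyRange (a : Int) (xs.length : Int) 1).foldl (fun total i =>
        (PySem.List.pyRange (i + 1) (xs.length : Int) 1).foldl (fun total j =>
          if p (PySem.List.pyGetD xs i d) (PySem.List.pyGetD xs j d) then total + 1 else total)
          total) t
        = t + pvPairsP p (xs.drop a) := by
  intro k
  induction k with
  | zero =>
      intro a ha hk t
      have hEq : a = xs.length := by omega
      subst hEq
      rw [PySem.List.pyRange_one_eq_nil (by omega)]
      simp [pvPairsP]
  | succ k ih =>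
      intro a ha hk t
      have hlt : a < xs.length := by omega
      rw [PySem.List.pyRange_one_cons (by exact_mod_cast hlt)]
      rw [List.foldl_cons]
      have hinner :
          (PySem.List.pyRange ((a : Int) + 1) (xs.length : Int) 1).foldl (fun total j =>
            if p (PySem.List.pyGetD xs (a : Int) d) (PySem.List.pyGetD xs j d) then total + 1 else total) t
          = t + ((xs.drop (a + 1)).countP (p (PySem.List.pyGetD xs (a : Int) d)) : Int) := by
        have h0 : (0 : Int) ≤ (a : Int) + 1 := by positivity
        have h := PySem.List.foldl_pyRange_pyGetD' xs d
          (fun total y => if p (PySem.List.pyGetD xs (a : Int) d) y then total + 1 else total) t h0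
        have hN : ((a : Int) + 1).toNat = a + 1 := by omega
        exact h.trans (by rw [hN]; exact pv_foldl_count _ _ t)
      rw [hinner]
      have hrec := ih (a + 1) (by omega) (by omega)
        (t + ((xs.drop (a + 1)).countP (p (PySem.List.pyGetD xs (a : Int) d)) : Int))
      have hcast : ((a : Int) + 1) = ((a + 1 : Nat) : Int) := by push_cast; ring
      rw [hcast, hrec]
      have hdrop : xs.drop a = xs[a] :: xs.drop (a + 1) := List.drop_eq_getElem_cons hlt
      have hget : PySem.List.pyGetD xs (a : Int) d = xs[a] := by
        rw [PySem.List.pyGetD_natCast]; exact List.getD_eq_getElem xs d hlt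
      rw [hdrop]
      simp [pvPairsP, hget]
      ring

theorem pv_nested_eq {α : Type} (p : α → α → Bool) (d : α) (xs : List α) :
    (PySem.List.pyRange 0 (xs.length : Int) 1).foldl (fun total i =>
      (PySem.List.pyRange (i + 1) (xs.length : Int) 1).foldl (fun total j =>
        if p (PySem.List.pyGetD xs i d) (PySem.List.pyGetD xs j d) then total + 1 else total)
        total) 0
      = pvPairsP p xs := by
  have := pv_nested_eq_aux p d xs xs.length 0 (by omega) (by omega) 0
  simpa using this

-- the three projections of a row used by both programs
def pvU (row : List Int) : Int := PySem.List.pyGetD row 1 0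
def pvV (row : List Int) : Int := PySem.List.pyGetD row 2 0
def pvW (row : List Int) : Int := PySem.List.pyGetD row 3 0

def pvShared2 (x y : List Int) : Bool :=
  decide (2 ≤ ((if pvU x = pvU y then (1 : Int) else 0) + (if pvV x = pvV y then 1 else 0)
      + (if pvW x = pvW y then 1 else 0)))

/-- Pointwise inclusion–exclusion: the ≥2-shared indicator decomposes into pairwise ones. -/
theorem pv_pointwise (x y : List Int) :
    (if pvShared2 x y then (1 : Int) else 0)
      = (if (pvU x, pvV x) == (pvU y, pvV y) then (1 : Int) else 0)
        + (if (pvU x, pvW x) == (pvU y, pvW y) then (1 : Int) else 0)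
        + (if (pvV x, pvW x) == (pvV y, pvW y) then (1 : Int) else 0)
        - 2 * (if (pvU x, pvV x, pvW x) == (pvU y, pvV y, pvW y) then (1 : Int) else 0) := by
  by_cases h1 : pvU x = pvU y <;> by_cases h2 : pvV x = pvV y <;> by_cases h3 : pvW x = pvW y <;>
    simp [pvShared2, h1, h2, h3, Prod.ext_iff]

theorem pv_countP_decomp (x : List Int) (r : List (List Int)) :
    (r.countP (pvShared2 x) : Int)
      = (r.countP (fun y => (pvU x, pvV x) == (pvU y, pvV y)) : Int)
        + (r.countP (fun y => (pvU x, pvW x) == (pvU y, pvW y)) : Int)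
        + (r.countP (fun y => (pvV x, pvW x) == (pvV y, pvW y)) : Int)
        - 2 * (r.countP (fun y => (pvU x, pvV x, pvW x) == (pvU y, pvV y, pvW y)) : Int) := by
  induction r with
  | nil => simp
  | cons y r ih =>
      have hpt := pv_pointwise x y
      simp only [List.countP_cons]
      push_cast
      split_ifs at hpt ⊢ <;> omega

theorem pv_pairsP_decomp (xs : List (List Int)) :
    pvPairsP pvShared2 xs
      = pvPairsP (fun x y => (pvU x, pvV x) == (pvU y, pvV y)) xs
        + pvPairsP (fun x y => (pvU x, pvW x) == (pvU y, pvW y)) xs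
        + pvPairsP (fun x y => (pvV x, pvW x) == (pvV y, pvW y)) xs
        - 2 * pvPairsP (fun x y => (pvU x, pvV x, pvW x) == (pvU y, pvV y, pvW y)) xs := by
  induction xs with
  | nil => simp [pvPairsP]
  | cons x r ih =>
      simp only [pvPairsP, ih, pv_countP_decomp x r]
      ring

/-- pairs-by-projection equals pairs of equal keys on the mapped list. -/
theorem pv_pairsP_map {α κ : Type} [BEq κ] (f : α → κ) (xs : List α) :
    pvPairsP (fun x y => f x == f y) xs = pvPairsP (fun a b => a == b) (xs.map f) := by
  induction xs with
  | nil => simp [pvPairsP]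
  | cons x r ih =>
      simp only [pvPairsP, List.map_cons, ih, List.countP_map]
      rfl

def pvG (c : Int) : Int := PySem.Int.floordiv (c * (c - 1)) 2

theorem pvG_succ (c : Int) : pvG (c + 1) = pvG c + c := by
  unfold pvG
  rw [PySem.Int.floordiv_eq_ediv_of_pos (b := 2) (by norm_num),
      PySem.Int.floordiv_eq_ediv_of_pos (b := 2) (by norm_num)]
  have h : (c + 1) * (c + 1 - 1) = c * (c - 1) + c * 2 := by ring
  rw [h, Int.add_mul_ediv_right _ _ (by norm_num)]

theorem pvG_zero : pvG 0 = 0 := by decide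

/-- Sum of C(count,2) over the distinct keys equals the number of equal unordered pairs. -/
theorem pv_sum_counts {κ : Type} [BEq κ] [LawfulBEq κ] [DecidableEq κ] (keys : List κ) :
    (keys.toFinset.sum (fun k => pvG (List.count k keys : Int)))
      = pvPairsP (fun a b => a == b) keys := by
  induction keys with
  | nil => simp [pvPairsP]
  | cons x r ih =>
      have hmem : x ∈ insert x r.toFinset := Finset.mem_insert_self x r.toFinset
      have hsplit : ∀ k ∈ insert x r.toFinset,
          pvG ((List.count k (x :: r) : Int))
            = pvG ((List.count k r : Int)) + (if k = x then (List.count x r : Int) else 0) := by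
        intro k _
        by_cases hk : k = x
        · rw [hk]
          have h1 : List.count x (x :: r) = List.count x r + 1 := by simp
          rw [h1]; push_cast; rw [pvG_succ]; simp
        · have h2 : ¬x = k := fun hh => hk hh.symm
          have h1 : List.count k (x :: r) = List.count k r := by
            simp [h2]
          rw [h1]; simp [hk]
      calc (x :: r).toFinset.sum (fun k => pvG ((List.count k (x :: r) : Int)))
          = (insert x r.toFinset).sum (fun k => pvG ((List.count k (x :: r) : Int))) := by
            simp
        _ = (insert x r.toFinset).sum (fun k =>
              pvG ((List.count k r : Int)) + (if k = x then (List.count x r : Int) else 0)) :=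
            Finset.sum_congr rfl hsplit
        _ = (insert x r.toFinset).sum (fun k => pvG ((List.count k r : Int)))
              + (insert x r.toFinset).sum (fun k => if k = x then (List.count x r : Int) else 0) :=
            Finset.sum_add_distrib
        _ = (insert x r.toFinset).sum (fun k => pvG ((List.count k r : Int))) + (List.count x r : Int) := by
            rw [Finset.sum_ite_eq' _ x _]
            simp [hmem]
        _ = r.toFinset.sum (fun k => pvG ((List.count k r : Int))) + (List.count x r : Int) := by
            by_cases hx : x ∈ r.toFinset
            · rw [Finset.insert_eq_self.mpr hx]
            · rw [Finset.sum_insert hx]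
              have : List.count x r = 0 := by
                simp [List.count_eq_zero]
                simpa using hx
              simp [this, pvG_zero]
        _ = pvPairsP (fun a b => a == b) r + (List.count x r : Int) := by rw [ih]
        _ = pvPairsP (fun a b => a == b) (x :: r) := by
            have hc : List.countP (fun b => x == b) r = List.count x r := by
              rw [List.count_eq_countP]
              refine List.countP_congr (fun a _ => ?_)
              by_cases h : x = a
              · subst h; simp
              · have h2 : ¬a = x := fun hh => h hh.symm
                simp [beq_iff_eq, h, h2]
            simp [pvPairsP, hc]

/-- B's per-projection pass computes exactly the equal-pair count. -/
theorem pv_pairCount_eq {κ : Type} [BEq κ] [LawfulBEq κ] [DecidableEq κ] (keys : List κ) :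
    pvPairCount keys = pvPairsP (fun a b => a == b) keys := by
  unfold pvPairCount
  rw [PySem.Dict.foldl_insert_getD_add_one_eq_counter]
  have hvals : (PySem.Dict.counter keys).values
      = (PySem.Set.ofList keys).map (fun k => (List.count k keys : Int)) := by
    show ((PySem.Dict.counter keys).items).map (·.2) = _
    rw [PySem.Dict.items_counter]
    simp
  rw [hvals, List.map_map]
  have hnd : (PySem.Set.ofList keys : List κ).Nodup := PySem.Set.nodup_ofList keys
  have hfin : (PySem.Set.ofList keys : List κ).toFinset = keys.toFinset := by
    apply Finset.ext
    intro a
    simp [PySem.Set.mem_ofList]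
  rw [← pv_sum_counts keys, ← hfin, List.sum_toFinset _ hnd]
  rfl

-- ===== VERDICT (by name: the statement is the Claim_ definition above) =====
theorem count_sharing_two_spec : Claim_equal_count_sharing_two := by
  intro algos _ _
  show count_sharing_two algos = count_sharing_two_alt algos
  have hA : count_sharing_two algos = pvPairsP pvShared2 algos := by
    unfold count_sharing_two
    rw [← pv_nested_eq pvShared2 [] algos]
    simp only [pvShared2, pvU, pvV, pvW, decide_eq_true_eq]
    congr
  rw [hA, pv_pairsP_decomp]
  unfold count_sharing_two_alt
  rw [pv_pairCount_eq, pv_pairCount_eq, pv_pairCount_eq, pv_pairCount_eq]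
  rw [pv_pairsP_map (fun row => (pvU row, pvV row)) algos,
      pv_pairsP_map (fun row => (pvU row, pvW row)) algos,
      pv_pairsP_map (fun row => (pvV row, pvW row)) algos,
      pv_pairsP_map (fun row => (pvU row, pvV row, pvW row)) algos]
  rfl
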